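-- pv_equiv track=rewrite | github.com/bob-pham/LeetCode-Solutions | get-min-removals.py | maxDistinct
-- ===== SOURCE A (Python) =====
-- from collections import Counter
--
-- def maxDistinct(arr, max_distinct):
--     counts = Counter(arr)
--     num_distinct = len(counts)
--
--     if num_distinct <= max_distinct:
--         return 0
--
--     sorted_keys = sorted(counts.keys(), key=lambda x: counts[x])
--
--     result = 0
--     for i in range(num_distinct - max_distinct):
--         result += counts[sorted_keys[i]]
--     return result
-- ===== SOURCE B (Python) =====
-- def maxDistinct(arr, max_distinct):
--     counts = {}
--     for x in arr:
--         counts[x] = counts.get(x, 0) + 1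
--     k = len(counts) - max_distinct
--     if k <= 0:
--         return 0
--     freq_of_freq = {}
--     for c in counts.values():
--         freq_of_freq[c] = freq_of_freq.get(c, 0) + 1
--     result = 0
--     for f in range(1, len(arr) + 1):
--         if k == 0:
--             break
--         take = freq_of_freq.get(f, 0)
--         if take > k:
--             take = k
--         result += take * f
--         k -= take
--     return result
-- ===== Notes on version B (the rewrite author's own statement) =====
-- stated objective: alternative
-- what changed: B replaces the comparison sort of keys by frequency with a counting-sort-style bucket pass: it builds a frequency-of-frequencies table and accumulates the k smallest counts by scanning frequency values 1..len(arr) upward, stopping once k counts are consumed.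
import Mathlib
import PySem

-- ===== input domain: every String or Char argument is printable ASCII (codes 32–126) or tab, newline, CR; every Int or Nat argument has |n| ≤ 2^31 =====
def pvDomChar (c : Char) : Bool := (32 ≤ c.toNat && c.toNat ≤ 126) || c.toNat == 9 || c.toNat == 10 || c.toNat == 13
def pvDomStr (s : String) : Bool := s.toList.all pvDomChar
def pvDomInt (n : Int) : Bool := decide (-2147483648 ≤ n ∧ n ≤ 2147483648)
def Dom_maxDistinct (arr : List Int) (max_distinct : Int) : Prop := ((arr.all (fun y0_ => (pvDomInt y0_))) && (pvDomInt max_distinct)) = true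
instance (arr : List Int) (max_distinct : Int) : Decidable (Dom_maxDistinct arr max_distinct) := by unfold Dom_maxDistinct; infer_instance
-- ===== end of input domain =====

-- B replaces A's comparison sort of the keys by frequency with a bucket (counting-sort style)
-- pass over a frequency-of-frequencies table; equivalence of the return values is proved on
-- Pre_ (0 ≤ max_distinct; A raises IndexError for negative max_distinct).

-- ===== PORT A =====
def maxDistinct (arr : List Int) (max_distinct : Int) : Int :=
  let counts := PySem.Dict.counter arr
  let num_distinct : Int := counts.size
  if num_distinct ≤ max_distinct then 0
  else
    let sorted_keys := PySem.List.sorted counts.keys (fun x => counts.getD x 0) false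
    (PySem.List.pyRange 0 (num_distinct - max_distinct) 1).foldl
      (fun result i => result + counts.getD (PySem.List.pyGetD sorted_keys i 0) 0) 0

-- ===== PORT B =====
def maxDistinct_alt (arr : List Int) (max_distinct : Int) : Int :=
  let counts := arr.foldl (fun d x => d.insert x (d.getD x 0 + 1)) PySem.Dict.empty
  let k : Int := counts.size - max_distinct
  if k ≤ 0 then 0
  else
    let fof := counts.values.foldl (fun d c => d.insert c (d.getD c 0 + 1)) PySem.Dict.empty
    ((PySem.List.pyRange 1 ((arr.length : Int) + 1) 1).foldl
        (fun (st : Int × Int) f =>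
          if st.1 = 0 then st
          else
            let take := fof.getD f 0
            let take := if take > st.1 then st.1 else take
            (st.1 - take, st.2 + take * f)) (k, 0)).2

-- ===== PRECONDITION & SPEC =====
-- Pre_ excludes max_distinct < 0: there A always raises IndexError (it indexes past the sorted key list).
def Pre_maxDistinct (_arr : List Int) (max_distinct : Int) : Prop := 0 ≤ max_distinct
instance (arr : List Int) (max_distinct : Int) : Decidable (Pre_maxDistinct arr max_distinct) := by unfold Pre_maxDistinct; infer_instance

def pvWitness_maxDistinct : List Int × Int := ([1, 1, 2, 3, 3, 3], 1)

def Spec_maxDistinct (arr : List Int) (max_distinct : Int) (out : Int) : Prop := out = maxDistinct_alt arr max_distinct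
instance (arr : List Int) (max_distinct : Int) (out : Int) : Decidable (Spec_maxDistinct arr max_distinct out) := by unfold Spec_maxDistinct; infer_instance

-- ===== CLAIM (what is proved, stated in full; the proofs are below) =====
def Claim_equal_maxDistinct : Prop := ∀ (arr : List Int) (max_distinct : Int), Dom_maxDistinct arr max_distinct → Pre_maxDistinct arr max_distinct → Spec_maxDistinct arr max_distinct (maxDistinct arr max_distinct)

-- ===== LEMMAS AND PROOFS =====

lemma pv_fold_zero (C : Int → Int) (l : List Int) (acc : Int) :
    l.foldl (fun (st : Int × Int) f =>
      if st.1 = 0 then st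
      else
        (st.1 - (if C f > st.1 then st.1 else C f),
         st.2 + (if C f > st.1 then st.1 else C f) * f)) (0, acc) = (0, acc) := by
  induction l with
  | nil => rfl
  | cons a t ih => simpa using ih

lemma pv_sorted_decomp (f : Int) (s : List Int) (hs : s.Pairwise (· ≤ ·)) (hlb : ∀ x ∈ s, f ≤ x) :
    ∃ s2, s = List.replicate (s.count f) f ++ s2 ∧ s2.Pairwise (· ≤ ·) ∧ ∀ x ∈ s2, f < x := by
  induction s with
  | nil => exact ⟨[], by simp, List.Pairwise.nil, by simp⟩
  | cons a t ih =>
    rcases List.pairwise_cons.mp hs with ⟨ha, ht⟩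
    by_cases hfa : a = f
    · subst hfa
      obtain ⟨s2, he, hp2, hgt⟩ := ih ht (fun x hx => le_trans (hlb a (.head t)) (ha x hx))
      refine ⟨s2, ?_, hp2, hgt⟩
      simp [List.count_cons_self, List.replicate_succ]
      exact he
    · have hfa' : f < a := lt_of_le_of_ne (hlb a (.head t)) (Ne.symm hfa)
      have hcnt : (a :: t).count f = 0 := by
        apply List.count_eq_zero.mpr
        intro hmem
        rcases List.mem_cons.mp hmem with rfl | hmem
        · exact hfa rfl
        · exact absurd (ha f hmem) (not_le.mpr hfa')
      refine ⟨a :: t, by simp [hcnt], hs, ?_⟩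
      intro x hx
      rcases List.mem_cons.mp hx with rfl | hx
      · exact hfa'
      · exact lt_of_lt_of_le hfa' (ha x hx)

lemma pv_bucket (fuel : Nat) : ∀ (C : Int → Int) (n lo : Int), (n - lo).toNat = fuel →
    ∀ (s : List Int) (k acc : Int), s.Pairwise (· ≤ ·) → 0 ≤ k →
    (∀ x ∈ s, lo < x ∧ x ≤ n) → (∀ f, lo < f → C f = (s.count f : Int)) →
    ((PySem.List.pyRange (lo + 1) (n + 1) 1).foldl
        (fun (st : Int × Int) f =>
          if st.1 = 0 then st
          else
            (st.1 - (if C f > st.1 then st.1 else C f),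
             st.2 + (if C f > st.1 then st.1 else C f) * f)) (k, acc)).2
      = acc + (s.take k.toNat).sum := by
  induction fuel with
  | zero =>
    intro C n lo hfuel s k acc hs hk hmem hC
    have hnl : n ≤ lo := by omega
    have hsnil : s = [] := by
      cases s with
      | nil => rfl
      | cons a t => exact absurd (hmem a (.head t)) (by omega)
    rw [PySem.List.pyRange_one_eq_nil (by omega)]
    simp [hsnil]
  | succ m ih =>
    intro C n lo hfuel s k acc hs hk hmem hC
    have hlon : lo < n := by omega
    rw [PySem.List.pyRange_one_cons (by omega)]
    by_cases hk0 : k = 0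
    · subst hk0
      rw [pv_fold_zero]
      simp
    · simp only [List.foldl_cons]
 -- k > 0 step
      obtain ⟨s2, hdec, hp2, hgt⟩ := pv_sorted_decomp (lo + 1) s hs
        (fun x hx => by have := (hmem x hx).1; omega)
      have hc := hC (lo + 1) (by omega)
      set c : Nat := s.count (lo + 1) with hcdef
      have hstep : (if k = 0 then ((k, acc) : Int × Int)
          else
            (k - (if C (lo + 1) > k then k else C (lo + 1)),
             acc + (if C (lo + 1) > k then k else C (lo + 1)) * (lo + 1)))
          = (k - min (c : Int) k, acc + (min (c : Int) k) * (lo + 1)) := by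
        rw [if_neg hk0, hc]
        by_cases hck : (c : Int) > k
        · have hmin : min (c : Int) k = k := by omega
          simp only [if_pos hck, hmin]
        · have hmin : min (c : Int) k = (c : Int) := by omega
          simp only [if_neg hck, hmin]
      rw [hstep]
      have hmem2 : ∀ x ∈ s2, lo + 1 < x ∧ x ≤ n := by
        intro x hx
        refine ⟨hgt x hx, ?_⟩
        have : x ∈ s := by rw [hdec]; exact List.mem_append_right _ hx
        exact (hmem x this).2
      have hC2 : ∀ f, lo + 1 < f → C f = (s2.count f : Int) := by
        intro f hf
        rw [hC f (by omega), hdec]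
        have : (List.replicate c (lo + 1)).count f = 0 :=
          List.count_eq_zero.mpr (by intro h; have := List.eq_of_mem_replicate h; omega)
        simp [List.count_append, this]
      have hrec := ih C n (lo + 1) (by omega) s2 (k - min (c : Int) k)
        (acc + (min (c : Int) k) * (lo + 1)) hp2 (by omega) hmem2 hC2
      rw [show lo + 1 + 1 = (lo + 1) + 1 by ring] at hrec
      rw [hrec]
      -- arithmetic: sums of the take
      have htake : s.take k.toNat
          = List.replicate (min c k.toNat) (lo + 1) ++ s2.take (k.toNat - c) := by
        rw [hdec, List.take_append, List.take_replicate, List.length_replicate,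
          Nat.min_comm]
      rw [htake, List.sum_append, List.sum_replicate, nsmul_eq_mul]
      have h1 : ((min c k.toNat : Nat) : Int) = min (c : Int) k := by omega
      have h2 : (k - min (c : Int) k).toNat = k.toNat - c := by omega
      rw [h2, h1]
      ring

lemma pv_map_sorted (keys : List Int) (g : Int → Int) :
    (PySem.List.sorted keys g false).map g = PySem.List.sorted (keys.map g) (fun x => x) false :=
  (PySem.List.sorted_id_eq_of_perm_of_pairwise (keys.map g)
    ((PySem.List.sorted keys g false).map g)
    ((PySem.List.sorted_perm keys g false).map g)
    (PySem.List.sorted_map_key_pairwise keys g)).symm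

lemma pv_sumA (g : Int → Int) (sk : List Int) : ∀ (K : Nat), K ≤ sk.length →
    (PySem.List.pyRange 0 (K : Int) 1).foldl (fun r i => r + g (PySem.List.pyGetD sk i 0)) 0
      = ((sk.map g).take K).sum := by
  intro K
  induction K with
  | zero => intro _; rw [show ((0 : Nat) : Int) = 0 by rfl, PySem.List.pyRange_one_eq_nil le_rfl]; simp
  | succ K ih =>
    intro hK
    have hKlen : K < sk.length := by omega
    rw [show ((K + 1 : Nat) : Int) = (K : Int) + 1 by push_cast; ring,
      PySem.List.pyRange_one_succ_right (by positivity), List.foldl_append]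
    simp only [List.foldl_cons, List.foldl_nil]
    rw [ih (by omega), PySem.List.pyGetD_natCast, List.getD_eq_getElem _ _ hKlen,
      List.take_add_one, List.sum_append]
    have : (sk.map g)[K]? = some (g sk[K]) := by
      rw [List.getElem?_map, List.getElem?_eq_getElem hKlen]
      rfl
    rw [this]
    simp

-- the two programs compute the same value for nonnegative max_distinct
lemma pv_main (arr : List Int) (m : Int) (hm : 0 ≤ m) : maxDistinct arr m = maxDistinct_alt arr m := by
  simp only [maxDistinct, maxDistinct_alt, PySem.Dict.foldl_insert_getD_add_one_eq_counter]
  set cnt := PySem.Dict.counter arr with hcnt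
  have hsz : cnt.keys.length = cnt.size := by
    simp [PySem.Dict.keys, PySem.Dict.size]
  by_cases h : (cnt.size : Int) ≤ m
  · rw [if_pos h, if_pos (by omega)]
  · rw [if_neg h, if_neg (by omega)]
    set g : Int → Int := fun x => cnt.getD x 0 with hg
    set sk := PySem.List.sorted cnt.keys g false with hsk
    set s := PySem.List.sorted cnt.values (fun x => x) false with hs
    have hvals : cnt.values = cnt.keys.map g :=
      PySem.Dict.values_eq_map_keys cnt (PySem.Dict.nodup_keys_counter arr) 0
    have hsklen : sk.length = cnt.size := by
      rw [hsk, PySem.List.length_sorted, hsz]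
    set K : Nat := ((cnt.size : Int) - m).toNat with hK
    have hKt : ((cnt.size : Int) - m) = (K : Int) := by omega
    rw [hKt]
    -- B side
    have hperm : ∀ f : Int, s.count f = cnt.values.count f := fun f =>
      (PySem.List.sorted_perm cnt.values (fun x => x) false).count_eq f
    have hB := pv_bucket ((arr.length : Int) - 0).toNat
      (fun f => (PySem.Dict.counter cnt.values).getD f 0)
      (arr.length : Int) 0 rfl s (K : Int) 0
      (by simpa using PySem.List.sorted_pairwise cnt.values (fun x => x))
      (by omega)
      (by
        intro x hx
        rw [hs, PySem.List.mem_sorted] at hx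
        rw [hvals] at hx
        obtain ⟨kx, hkx, rfl⟩ := List.mem_map.mp hx
        rw [hcnt, PySem.Dict.keys_counter, PySem.Set.mem_ofList] at hkx
        have hgk : g kx = (arr.count kx : Int) := by rw [hg, hcnt]; exact PySem.Dict.getD_counter arr kx
        rw [hgk]
        have h1 : 0 < arr.count kx := List.count_pos_iff.mpr hkx
        have h2 : arr.count kx ≤ arr.length := List.count_le_length
        omega)
      (by
        intro f hf
        simp only [PySem.Dict.getD_counter, hperm f])
    simp only [Int.toNat_natCast] at hB
    rw [show (0 : Int) + 1 = 1 by ring] at hB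
    rw [hB]
    -- A side
    have hA := pv_sumA g sk K (by omega)
    rw [hA, hsk, pv_map_sorted, ← hvals, ← hs]
    ring

-- ===== VERDICT (by name: the statement is the Claim_ definition above) =====
theorem maxDistinct_spec : Claim_equal_maxDistinct := by
  intro arr m _ hpre
  exact pv_main arr m hpre
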